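-- pv_equiv track=rewrite | github.com/nisaruj/MCV-Chatbot | intent/util.py | validatePoliteness
-- ===== SOURCE A (Python) =====
-- def validatePoliteness(sentenceList):
--   veryPolite = False
--   veryImpolite = False
--   for e in sentenceList:
--     if e[1] == 2:
--       veryPolite = True
--       break
--   for e in sentenceList:
--     if e[1] == 0:
--       veryImpolite = True
--       break
--   return not (veryPolite and veryImpolite)
-- ===== SOURCE B (Python) =====
-- def validatePoliteness(sentenceList):
--   # Find the FIRST polarized sentence (label 0 or 2).  If none exists the
--   # list cannot contain both polarities.  Otherwise both polarities are
--   # present exactly when the OPPOSITE label (2 - label) occurs later on.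
--   for i, e in enumerate(sentenceList):
--     if e[1] == 2 or e[1] == 0:
--       other = 2 - e[1]
--       for f in sentenceList[i + 1:]:
--         if f[1] == other:
--           return False
--       return True
--   return True
-- ===== Notes on version B (the rewrite author's own statement) =====
-- stated objective: alternative
-- what changed: Instead of A's two independent existence scans (for label 2 and for label 0), B locates the first polarized sentence (label 0 or 2) and then searches only the remaining tail for the single opposite label 2-e[1], returning False iff it is found.
import Mathlib
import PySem

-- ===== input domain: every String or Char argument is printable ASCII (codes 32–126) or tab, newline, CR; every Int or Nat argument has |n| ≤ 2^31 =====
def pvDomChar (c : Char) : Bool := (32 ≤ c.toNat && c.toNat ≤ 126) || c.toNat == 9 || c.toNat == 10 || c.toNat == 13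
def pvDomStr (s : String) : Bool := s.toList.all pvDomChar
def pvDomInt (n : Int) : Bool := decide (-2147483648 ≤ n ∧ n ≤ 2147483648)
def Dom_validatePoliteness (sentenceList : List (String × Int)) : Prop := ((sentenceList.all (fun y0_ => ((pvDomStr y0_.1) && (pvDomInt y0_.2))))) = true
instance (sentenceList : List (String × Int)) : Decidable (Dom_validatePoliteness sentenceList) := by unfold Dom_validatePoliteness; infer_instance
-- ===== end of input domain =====

-- B replaces A's two independent existence scans by: find the first polarized
-- sentence (label 0 or 2), then search only the tail for the opposite label.

-- ===== PORT A =====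
-- first loop: scan for e[1] == 2, break on first hit
def validatePolitenessLoop1 : List (String × Int) → Bool
  | [] => false
  | e :: t => if e.2 == 2 then true else validatePolitenessLoop1 t

-- second loop: scan for e[1] == 0, break on first hit
def validatePolitenessLoop2 : List (String × Int) → Bool
  | [] => false
  | e :: t => if e.2 == 0 then true else validatePolitenessLoop2 t

def validatePoliteness (sentenceList : List (String × Int)) : Bool :=
  let veryPolite := validatePolitenessLoop1 sentenceList
  let veryImpolite := validatePolitenessLoop2 sentenceList
  !(veryPolite && veryImpolite)

-- ===== PORT B =====
-- inner loop: does the tail contain the opposite label `other`? (return False if so)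
def validatePolitenessAltInner (other : Int) : List (String × Int) → Bool
  | [] => true
  | f :: t => if f.2 == other then false else validatePolitenessAltInner other t

-- outer loop: find the first polarized sentence; the tail after index i is sentenceList[i+1:]
def validatePoliteness_alt (sentenceList : List (String × Int)) : Bool :=
  match sentenceList with
  | [] => true
  | e :: t =>
    if e.2 == 2 || e.2 == 0 then validatePolitenessAltInner (2 - e.2) t
    else validatePoliteness_alt t

-- ===== PRECONDITION & SPEC =====
def Spec_validatePoliteness (sentenceList : List (String × Int)) (out : Bool) : Prop := out = validatePoliteness_alt sentenceList
instance (sentenceList : List (String × Int)) (out : Bool) : Decidable (Spec_validatePoliteness sentenceList out) := by unfold Spec_validatePoliteness; infer_instance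

-- ===== CLAIM (what is proved, stated in full; the proofs are below) =====
def Claim_equal_validatePoliteness : Prop := ∀ (sentenceList : List (String × Int)), Dom_validatePoliteness sentenceList → Spec_validatePoliteness sentenceList (validatePoliteness sentenceList)

-- ===== LEMMAS AND PROOFS =====
theorem altInner_zero (t : List (String × Int)) :
    validatePolitenessAltInner 0 t = !validatePolitenessLoop2 t := by
  induction t with
  | nil => rfl
  | cons f t ih => simp [validatePolitenessAltInner, validatePolitenessLoop2, ih]

theorem altInner_two (t : List (String × Int)) :
    validatePolitenessAltInner 2 t = !validatePolitenessLoop1 t := by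
  induction t with
  | nil => rfl
  | cons f t ih => simp [validatePolitenessAltInner, validatePolitenessLoop1, ih]

theorem alt_eq (l : List (String × Int)) :
    validatePoliteness_alt l = !(validatePolitenessLoop1 l && validatePolitenessLoop2 l) := by
  induction l with
  | nil => rfl
  | cons e t ih =>
    simp only [validatePoliteness_alt, validatePolitenessLoop1, validatePolitenessLoop2]
    by_cases h2 : e.2 = 2
    · have h0 : ¬ ((2:Int) = 0) := by omega
      simp [h2, altInner_zero]
    · by_cases h0 : e.2 = 0
      · simp [h0, altInner_two]
      · simp [h2, h0, ih]

-- ===== VERDICT (by name: the statement is the Claim_ definition above) =====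
theorem validatePoliteness_spec : Claim_equal_validatePoliteness := by
  intro l _
  unfold Spec_validatePoliteness validatePoliteness
  rw [alt_eq]
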